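-- pv_equiv track=rewrite | github.com/altingia/dante | gff.py | idx_ranges
-- ===== SOURCE A (Python) =====
-- from operator import itemgetter
-- from itertools import groupby
--
-- def idx_ranges(indices, THRESHOLD_SEGMENT):
-- 	ranges = []
-- 	for key, group in groupby(enumerate(indices), lambda index_item: index_item[0] - index_item[1]):
-- 			group = list(map(itemgetter(1), group))
-- 			if len(group) > THRESHOLD_SEGMENT:
-- 				# Take boundaries of the group vectors
-- 				ranges.append(group[0])
-- 				ranges.append(group[-1])
-- 	return ranges
-- ===== SOURCE B (Python) =====
-- def idx_ranges(indices, THRESHOLD_SEGMENT):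
-- 	# Single explicit pass: track current run's start, previous value and count.
-- 	if not indices:
-- 		return []
-- 	ranges = []
-- 	start = prev = indices[0]
-- 	count = 1
-- 	for x in indices[1:]:
-- 		if x == prev + 1:
-- 			prev = x
-- 			count += 1
-- 		else:
-- 			if count > THRESHOLD_SEGMENT:
-- 				ranges.append(start)
-- 				ranges.append(prev)
-- 			start = prev = x
-- 			count = 1
-- 	if count > THRESHOLD_SEGMENT:
-- 		ranges.append(start)
-- 		ranges.append(prev)
-- 	return ranges
-- ===== Notes on version B (the rewrite author's own statement) =====
-- stated objective: simpler
-- what changed: Replaces the groupby/enumerate/itemgetter pipeline with one explicit pass that tracks the current run's start, previous value and count, flushing boundaries when a run ends; this also avoids allocating tuples and per-group lists, a constant-factor speedup.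
import Mathlib
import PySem

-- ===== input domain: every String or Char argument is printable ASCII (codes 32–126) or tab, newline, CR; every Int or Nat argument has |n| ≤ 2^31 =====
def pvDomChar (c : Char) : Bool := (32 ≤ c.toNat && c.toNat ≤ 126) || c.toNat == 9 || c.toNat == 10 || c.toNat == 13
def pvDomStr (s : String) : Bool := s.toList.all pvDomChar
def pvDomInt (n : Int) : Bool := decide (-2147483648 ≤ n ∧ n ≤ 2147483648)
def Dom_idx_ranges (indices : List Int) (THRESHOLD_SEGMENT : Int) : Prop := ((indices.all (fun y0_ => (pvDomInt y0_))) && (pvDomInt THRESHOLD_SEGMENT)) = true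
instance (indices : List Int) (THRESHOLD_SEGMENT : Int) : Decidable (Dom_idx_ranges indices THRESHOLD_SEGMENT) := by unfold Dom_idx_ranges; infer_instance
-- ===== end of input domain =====

-- B replaces A's groupby/enumerate pipeline with one explicit pass tracking the
-- current run's start/prev/count (simpler decomposition, same O(n) cost).

-- ===== PORT A =====
-- enumerate(indices)
def pvEnumFrom (n : Int) : List Int → List (Int × Int)
  | [] => []
  | x :: xs => (n, x) :: pvEnumFrom (n + 1) xs

-- groupby(..., key = λ (i, v). i - v): list of groups of consecutive equal keys
def pvGroupby : List (Int × Int) → List (List (Int × Int))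
  | [] => []
  | [p] => [[p]]
  | p :: q :: rest =>
    match pvGroupby (q :: rest) with
    | [] => [[p]]
    | g :: gs => if p.1 - p.2 = q.1 - q.2 then (p :: g) :: gs else [p] :: g :: gs

def idx_ranges (indices : List Int) (THRESHOLD_SEGMENT : Int) : List Int :=
  (pvGroupby (pvEnumFrom 0 indices)).foldl
    (fun ranges g =>
      let group := g.map Prod.snd
      -- group is nonempty, so group[0] / group[-1] never raise; getD 0 is unreachable
      if (group.length : Int) > THRESHOLD_SEGMENT then
        ranges ++ [group.head?.getD 0, group.getLast?.getD 0]
      else ranges)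
    []

-- ===== PORT B =====
-- the loop of Source B: state = (ranges, start, prev, count)
def idxScan (thr : Int) : List Int → Int → Int → Int → List Int → List Int
  | ranges, s, p, c, [] => ranges ++ (if c > thr then [s, p] else [])
  | ranges, s, p, c, x :: xs =>
    if x = p + 1 then idxScan thr ranges s x (c + 1) xs
    else idxScan thr (ranges ++ (if c > thr then [s, p] else [])) x x 1 xs

def idx_ranges_alt (indices : List Int) (THRESHOLD_SEGMENT : Int) : List Int :=
  match indices with
  | [] => []
  | x :: xs => idxScan THRESHOLD_SEGMENT [] x x 1 xs

-- ===== PRECONDITION & SPEC =====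
def Spec_idx_ranges (indices : List Int) (THRESHOLD_SEGMENT : Int) (out : List Int) : Prop := out = idx_ranges_alt indices THRESHOLD_SEGMENT
instance (indices : List Int) (THRESHOLD_SEGMENT : Int) (out : List Int) : Decidable (Spec_idx_ranges indices THRESHOLD_SEGMENT out) := by unfold Spec_idx_ranges; infer_instance

-- ===== CLAIM (what is proved, stated in full; the proofs are below) =====
def Claim_equal_idx_ranges : Prop := ∀ (indices : List Int) (THRESHOLD_SEGMENT : Int), Dom_idx_ranges indices THRESHOLD_SEGMENT → Spec_idx_ranges indices THRESHOLD_SEGMENT (idx_ranges indices THRESHOLD_SEGMENT)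

-- ===== LEMMAS AND PROOFS =====

-- maximal runs of consecutive (+1) values: the common intermediate structure
def splitRuns : List Int → List (List Int)
  | [] => []
  | [a] => [[a]]
  | a :: b :: rest =>
    match splitRuns (b :: rest) with
    | [] => [[a]]
    | g :: gs => if b = a + 1 then (a :: g) :: gs else [a] :: g :: gs

def emitGroup (thr : Int) (g : List Int) : List Int :=
  if (g.length : Int) > thr then [g.head?.getD 0, g.getLast?.getD 0] else []

def runListN (s : Int) : Nat → List Int
  | 0 => []
  | k + 1 => s :: runListN (s + 1) k

theorem splitRuns_cons_ne_nil (a : Int) (xs : List Int) : splitRuns (a :: xs) ≠ [] := by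
  cases xs with
  | nil => simp [splitRuns]
  | cons b rest =>
    simp only [splitRuns]
    cases h : splitRuns (b :: rest) with
    | nil => simp
    | cons g gs =>
      show ¬(if b = a + 1 then (a :: g) :: gs else [a] :: g :: gs) = []
      split <;> simp

theorem pvGroupby_eq_splitRuns (xs : List Int) : ∀ n : Int,
    (pvGroupby (pvEnumFrom n xs)).map (List.map Prod.snd) = splitRuns xs := by
  induction xs with
  | nil => intro n; simp [pvEnumFrom, pvGroupby, splitRuns]
  | cons a tl ih =>
    intro n
    cases tl with
    | nil => simp [pvEnumFrom, pvGroupby, splitRuns]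
    | cons b rest =>
      have hih := ih (n + 1)
      simp only [pvEnumFrom, pvGroupby, splitRuns]
      rw [show pvEnumFrom (n + 1) (b :: rest) = (n + 1, b) :: pvEnumFrom (n + 1 + 1) rest from rfl] at hih
      cases h : pvGroupby ((n + 1, b) :: pvEnumFrom (n + 1 + 1) rest) with
      | nil =>
        exfalso
        rw [h] at hih
        exact splitRuns_cons_ne_nil b rest (by simpa using hih.symm)
      | cons g gs =>
        rw [h] at hih
        simp only [List.map_cons] at hih
        rw [← hih]
        show List.map (List.map Prod.snd)
            (if n - a = n + 1 - b then ((n, a) :: g) :: gs else [(n, a)] :: g :: gs)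
          = (if b = a + 1 then (a :: g.map Prod.snd) :: gs.map (List.map Prod.snd)
             else [a] :: (g.map Prod.snd) :: gs.map (List.map Prod.snd))
        have hcond : (n - a = n + 1 - b) ↔ (b = a + 1) := by omega
        by_cases hb : b = a + 1
        · rw [if_pos (hcond.mpr hb), if_pos hb]; simp
        · rw [if_neg (fun hc => hb (hcond.mp hc)), if_neg hb]; simp

theorem foldl_emit (thr : Int) (gs : List (List (Int × Int))) : ∀ r : List Int,
    gs.foldl
      (fun ranges g =>
        let group := g.map Prod.snd
        if (group.length : Int) > thr then
          ranges ++ [group.head?.getD 0, group.getLast?.getD 0]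
        else ranges) r
    = r ++ gs.flatMap (fun g => emitGroup thr (g.map Prod.snd)) := by
  induction gs with
  | nil => intro r; simp
  | cons g gs ih =>
    intro r
    simp only [List.foldl_cons, List.flatMap_cons, ih, emitGroup]
    split <;> simp

theorem idx_ranges_eq_emit (indices : List Int) (thr : Int) :
    idx_ranges indices thr = (splitRuns indices).flatMap (emitGroup thr) := by
  unfold idx_ranges
  rw [foldl_emit, List.nil_append, ← pvGroupby_eq_splitRuns indices 0, List.flatMap_map]

theorem runListN_length (k : Nat) : ∀ s : Int, (runListN s k).length = k := by
  induction k with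
  | zero => intro s; rfl
  | succ k ih => intro s; simp [runListN, ih]

theorem runListN_head (s : Int) (k : Nat) : (runListN s (k + 1)).head?.getD 0 = s := rfl

theorem runListN_getLast (k : Nat) : ∀ s : Int, (runListN s (k + 1)).getLast?.getD 0 = s + k := by
  induction k with
  | zero => intro s; simp [runListN]
  | succ k ih =>
    intro s
    show ((s :: runListN (s + 1) (k + 1)).getLast?).getD 0 = s + (k + 1 : Nat)
    have hne : runListN (s + 1) (k + 1) ≠ [] := by simp [runListN]
    rw [List.getLast?_cons]
    have h2 := ih (s + 1)
    cases h : (runListN (s + 1) (k + 1)).getLast? with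
    | none => exact absurd (List.getLast?_eq_none_iff.mp h) hne
    | some v =>
      rw [h] at h2
      simp only [Option.getD_some]
      simp only [Option.getD_some] at h2
      push_cast
      omega

theorem runListN_extend (k : Nat) : ∀ (s : Int) (xs : List Int),
    runListN s k ++ (s + k) :: xs = runListN s (k + 1) ++ xs := by
  induction k with
  | zero => intro s xs; simp [runListN]
  | succ k ih =>
    intro s xs
    show s :: (runListN (s + 1) k ++ (s + (k + 1 : Nat)) :: xs) = s :: (runListN (s + 1) (k + 1) ++ xs)
    rw [show (s + (k + 1 : Nat) : Int) = (s + 1) + k by push_cast; ring, ih (s + 1) xs]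

theorem splitRuns_run_prefix (k : Nat) : ∀ (s : Int) (xs : List Int),
    xs.head? ≠ some (s + k + 1) →
    splitRuns (runListN s (k + 1) ++ xs) = runListN s (k + 1) :: splitRuns xs := by
  induction k with
  | zero =>
    intro s xs hx
    cases xs with
    | nil => simp [runListN, splitRuns]
    | cons x xs' =>
      show splitRuns (s :: x :: xs') = [s] :: splitRuns (x :: xs')
      have hxs : x ≠ s + 1 := by
        intro h; apply hx; simp [h]
      simp only [splitRuns]
      cases h : splitRuns (x :: xs') with
      | nil => exact absurd h (splitRuns_cons_ne_nil x xs')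
      | cons g gs =>
        show (if x = s + 1 then (s :: g) :: gs else [s] :: g :: gs) = [s] :: g :: gs
        rw [if_neg hxs]
  | succ k ih =>
    intro s xs hx
    have hrw : runListN s (k + 1 + 1) ++ xs
        = s :: ((s + 1) :: (runListN (s + 1 + 1) k ++ xs)) := by
      simp [runListN]
    have hih := ih (s + 1) xs (by
      intro h; apply hx
      rw [h]; congr 1; push_cast; ring)
    have hih' : splitRuns ((s + 1) :: (runListN (s + 1 + 1) k ++ xs))
        = runListN (s + 1) (k + 1) :: splitRuns xs := by
      simpa [runListN] using hih
    rw [hrw]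
    show splitRuns (s :: (s + 1) :: (runListN (s + 1 + 1) k ++ xs)) = _
    simp only [splitRuns]
    cases h : splitRuns ((s + 1) :: (runListN (s + 1 + 1) k ++ xs)) with
    | nil => exact absurd h (splitRuns_cons_ne_nil _ _)
    | cons g gs =>
      rw [h] at hih'
      injection hih' with hg hgs
      simp [hg, hgs, runListN]

theorem idxScan_acc (thr : Int) (xs : List Int) : ∀ (r : List Int) (s p c : Int),
    idxScan thr r s p c xs = r ++ idxScan thr [] s p c xs := by
  induction xs with
  | nil => intro r s p c; simp [idxScan]
  | cons x xs ih =>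
    intro r s p c
    simp only [idxScan]
    split
    · rw [ih r, ih []]
    · rw [ih (r ++ _), ih ([] ++ _), List.nil_append, List.append_assoc]

theorem emit_runListN (thr : Int) (s : Int) (k : Nat) :
    emitGroup thr (runListN s (k + 1)) = if ((k : Int) + 1) > thr then [s, s + k] else [] := by
  unfold emitGroup
  rw [runListN_length, runListN_head, runListN_getLast]
  norm_num

theorem scan_eq (thr : Int) (xs : List Int) : ∀ (s : Int) (k : Nat),
    idxScan thr [] s (s + k) ((k : Int) + 1) xs
      = ((splitRuns (runListN s (k + 1) ++ xs)).flatMap (emitGroup thr)) := by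
  induction xs with
  | nil =>
    intro s k
    have hsp := splitRuns_run_prefix k s [] (by simp)
    rw [List.append_nil] at hsp
    rw [List.append_nil, hsp]
    simp [idxScan, splitRuns, emit_runListN]
  | cons x xs ih =>
    intro s k
    simp only [idxScan]
    by_cases hx : x = s + k + 1
    · rw [if_pos hx]
      have h1 : idxScan thr [] s x ((k : Int) + 1 + 1) xs
          = idxScan thr [] s (s + ((k + 1 : Nat) : Int)) (((k + 1 : Nat) : Int) + 1) xs := by
        congr 1 <;> push_cast <;> omega
      rw [h1, ih s (k + 1)]
      have h2 : runListN s (k + 1) ++ x :: xs = runListN s (k + 1 + 1) ++ xs := by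
        rw [show x = s + ((k + 1 : Nat) : Int) by push_cast; omega]
        exact runListN_extend (k + 1) s xs
      rw [h2]
    · rw [if_neg hx]
      rw [idxScan_acc, List.nil_append]
      have h1 : idxScan thr [] x x 1 xs
          = idxScan thr [] x (x + ((0 : Nat) : Int)) (((0 : Nat) : Int) + 1) xs := by
        norm_num
      rw [h1, ih x 0, splitRuns_run_prefix k s (x :: xs) (by simp [hx]),
        List.flatMap_cons, emit_runListN,
        show runListN x (0 + 1) ++ xs = x :: xs from by simp [runListN]]

theorem alt_eq_emit (indices : List Int) (thr : Int) :
    idx_ranges_alt indices thr = (splitRuns indices).flatMap (emitGroup thr) := by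
  cases indices with
  | nil => rfl
  | cons x xs =>
    show idxScan thr [] x x 1 xs = _
    have h1 : idxScan thr [] x x 1 xs
        = idxScan thr [] x (x + ((0 : Nat) : Int)) (((0 : Nat) : Int) + 1) xs := by norm_num
    rw [h1, scan_eq thr xs x 0,
      show runListN x (0 + 1) ++ xs = x :: xs from by simp [runListN]]

-- ===== VERDICT (by name: the statement is the Claim_ definition above) =====
theorem idx_ranges_spec : Claim_equal_idx_ranges := by
  intro indices thr _
  show idx_ranges indices thr = idx_ranges_alt indices thr
  rw [idx_ranges_eq_emit, alt_eq_emit]
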